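-- pv_equiv track=rewrite | github.com/Akame1981/SecureChat | gui/message_styling.py | _soft_break
-- ===== SOURCE A (Python) =====
-- def _soft_break(text: str, limit: int = 48) -> str:
--     """Insert zero-width space into very long unbroken sequences to allow wrapping."""
--     out = []
--     cur = []
--     for ch in text:
--         cur.append(ch)
--         if ch.isspace():
--             out.extend(cur)
--             cur = []
--         elif len(cur) >= limit:
--             out.extend(cur)
--             out.append('\u200b')  # zero-width space
--             cur = []
--     out.extend(cur)
--     return ''.join(out)
-- ===== SOURCE B (Python) =====
-- def _soft_break(text: str, limit: int = 48) -> str: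
--     """Split text into maximal whitespace / non-whitespace runs; copy whitespace
--     runs verbatim and chop each non-whitespace run into blocks of `limit`
--     characters, appending a zero-width space after every full block."""
--     L = limit if limit > 1 else 1
--     pieces = []
--     i = 0
--     n = len(text)
--     while i < n:
--         j = i
--         if text[i].isspace():
--             while j < n and text[j].isspace():
--                 j += 1
--             pieces.append(text[i:j])
--         else:
--             while j < n and not text[j].isspace():
--                 j += 1
--             run = text[i:j]
--             k = 0
--             while k + L <= len(run):
--                 pieces.append(run[k:k + L])
--                 pieces.append('\u200b')
--                 k += L
--             pieces.append(run[k:])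
--         i = j
--     return ''.join(pieces)
-- ===== Notes on version B (the rewrite author's own statement) =====
-- stated objective: alternative
-- what changed: Replaces A's single char-by-char loop with a pending buffer by a run decomposition: the text is split into maximal whitespace / non-whitespace runs, whitespace runs are copied verbatim, and each non-whitespace run is emitted in blocks of `limit` characters with a zero-width space after every full block.
import Mathlib
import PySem

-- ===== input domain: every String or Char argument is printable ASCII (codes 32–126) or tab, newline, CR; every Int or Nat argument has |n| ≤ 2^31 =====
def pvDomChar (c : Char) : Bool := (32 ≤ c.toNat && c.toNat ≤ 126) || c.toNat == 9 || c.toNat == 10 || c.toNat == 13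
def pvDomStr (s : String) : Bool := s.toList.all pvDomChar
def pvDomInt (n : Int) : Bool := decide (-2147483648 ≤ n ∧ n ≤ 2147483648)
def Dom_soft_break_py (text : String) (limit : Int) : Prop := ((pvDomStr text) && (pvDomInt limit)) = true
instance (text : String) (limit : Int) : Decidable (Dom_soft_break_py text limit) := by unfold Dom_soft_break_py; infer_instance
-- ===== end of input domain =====

-- B rebuilds the string from maximal whitespace / non-whitespace runs instead of A's
-- char-by-char loop with a pending buffer; same output, stated as exact equivalence.

-- ===== PORT A =====
-- the for-loop of _soft_break: state = (out, cur), flush on whitespace or when cur reaches limit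
def softBreakLoop (limit : Int) : List Char → List Char → List Char → List Char
  | [], out, cur => out ++ cur
  | ch :: rest, out, cur =>
    let cur' := cur ++ [ch]
    if PySem.Chars.isspace ch then
      softBreakLoop limit rest (out ++ cur') []
    else if limit ≤ (cur'.length : Int) then
      softBreakLoop limit rest (out ++ cur' ++ ['\u200B']) []
    else
      softBreakLoop limit rest out cur'

def soft_break_py (text : String) (limit : Int) : String :=
  String.mk (softBreakLoop limit text.toList [] [])

-- ===== PORT B =====
-- Source B's inner block loop: emit blocks of L chars, a zero-width space after every full block
def emitBlocks (L : Nat) (run : List Char) : List Char :=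
  if h : 0 < L ∧ L ≤ run.length then
    run.take L ++ '\u200B' :: emitBlocks L (run.drop L)
  else
    run
termination_by run.length
decreasing_by simp [List.length_drop]; omega

-- Source B's outer while loop: peel off one maximal run per step
def runLoop (L : Nat) (cs : List Char) : List Char :=
  match cs with
  | [] => []
  | c :: rest =>
    if PySem.Chars.isspace c then
      (c :: rest).takeWhile PySem.Chars.isspace
        ++ runLoop L ((c :: rest).dropWhile PySem.Chars.isspace)
    else
      emitBlocks L ((c :: rest).takeWhile (fun d => !PySem.Chars.isspace d))
        ++ runLoop L ((c :: rest).dropWhile (fun d => !PySem.Chars.isspace d))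
termination_by cs.length
decreasing_by
  · simp [*]
    exact List.length_dropWhile_le _ _
  · simp [*]
    exact List.length_dropWhile_le _ _

def soft_break_py_alt (text : String) (limit : Int) : String :=
  let L : Nat := if 1 < limit then limit.toNat else 1
  String.mk (runLoop L text.toList)

-- ===== PRECONDITION & SPEC =====
def Spec_soft_break_py (text : String) (limit : Int) (out : String) : Prop := out = soft_break_py_alt text limit
instance (text : String) (limit : Int) (out : String) : Decidable (Spec_soft_break_py text limit out) := by unfold Spec_soft_break_py; infer_instance

-- ===== CLAIM (what is proved, stated in full; the proofs are below) =====
def Claim_equal_soft_break_py : Prop := ∀ (text : String) (limit : Int), Dom_soft_break_py text limit → Spec_soft_break_py text limit (soft_break_py text limit)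

-- ===== LEMMAS AND PROOFS =====

-- proof-only middle form: a budget-counting rewrite of the output, b = chars left before a break
def gAux (L : Nat) : Nat → List Char → List Char
  | _, [] => []
  | b, c :: cs =>
    if PySem.Chars.isspace c then c :: gAux L L cs
    else if b ≤ 1 then c :: '\u200B' :: gAux L L cs
    else c :: gAux L (b - 1) cs

theorem limit_cmp (limit : Int) (m : Nat) (hm : 1 ≤ m) :
    (limit ≤ (m : Int)) ↔ ((if 1 < limit then limit.toNat else 1) ≤ m) := by
  split <;> omega

theorem aLoop_eq_gAux (limit : Int) (L : Nat) (hLdef : L = if 1 < limit then limit.toNat else 1) :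
    ∀ (rest out cur : List Char), cur.length < L →
      softBreakLoop limit rest out cur = out ++ cur ++ gAux L (L - cur.length) rest := by
  intro rest
  induction rest with
  | nil => intro out cur _; simp [softBreakLoop, gAux]
  | cons ch rest ih =>
    intro out cur hcur
    rw [softBreakLoop]
    by_cases hws : PySem.Chars.isspace ch
    · rw [if_pos hws, ih _ _ (by simp only [List.length_nil]; subst hLdef; split <;> omega), gAux, if_pos hws]
      simp
    · rw [if_neg hws]
      by_cases hlim : limit ≤ ((cur ++ [ch]).length : Int)
      · have hb : L - cur.length ≤ 1 := by
          have := (limit_cmp limit (cur ++ [ch]).length (by simp)).mp hlim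
          rw [← hLdef] at this; simp at this; omega
        rw [if_pos hlim, ih _ _ (by simp only [List.length_nil]; subst hLdef; split <;> omega),
          gAux, if_neg hws, if_pos hb]
        simp
      · have hb : ¬ (L - cur.length ≤ 1) := by
          intro h
          exact hlim ((limit_cmp limit (cur ++ [ch]).length (by simp)).mpr
            (by rw [← hLdef]; simp; omega))
        have hlen : (cur ++ [ch]).length < L := by
          have := fun h => hlim ((limit_cmp limit (cur ++ [ch]).length (by simp)).mpr
            (by rw [← hLdef]; exact h))
          simp at this ⊢; omega
        rw [if_neg hlim, ih _ _ hlen, gAux, if_neg hws, if_neg hb]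
        have : L - cur.length - 1 = L - (cur ++ [ch]).length := by simp; omega
        simp [this]

theorem gAux_ws (L : Nat) (ws rest : List Char) (hws : ∀ c ∈ ws, PySem.Chars.isspace c = true) :
    gAux L L (ws ++ rest) = ws ++ gAux L L rest := by
  induction ws with
  | nil => rfl
  | cons c ws ih =>
    rw [List.cons_append, gAux, if_pos (hws c (by simp)),
      ih (fun d hd => hws d (by simp [hd]))]
    rfl

theorem gAux_reset (L b : Nat) (rest : List Char)
    (h : rest = [] ∨ ∃ c cs, rest = c :: cs ∧ PySem.Chars.isspace c = true) :
    gAux L b rest = gAux L L rest := by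
  rcases h with h | ⟨c, cs, rfl, hc⟩
  · subst h; rfl
  · rw [gAux, gAux, if_pos hc, if_pos hc]

theorem gAux_small (L : Nat) :
    ∀ (run : List Char) (b : Nat) (rest : List Char),
      (∀ c ∈ run, PySem.Chars.isspace c = false) → run.length < b →
      gAux L b (run ++ rest) = run ++ gAux L (b - run.length) rest := by
  intro run
  induction run with
  | nil => intro b rest _ _; simp
  | cons c run ih =>
    intro b rest hnw hlen
    simp at hlen
    rw [List.cons_append, gAux, if_neg (by simp [hnw c (by simp)]),
      if_neg (by omega), ih (b - 1) rest (fun d hd => hnw d (by simp [hd])) (by omega)]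
    have : b - 1 - run.length = b - (c :: run).length := by simp; omega
    rw [this]; rfl

theorem gAux_block (L : Nat) :
    ∀ (run : List Char) (b : Nat) (rest : List Char),
      (∀ c ∈ run, PySem.Chars.isspace c = false) → 1 ≤ b → b ≤ run.length →
      gAux L b (run ++ rest) = run.take b ++ '\u200B' :: gAux L L (run.drop b ++ rest) := by
  intro run
  induction run with
  | nil => intro b rest _ hb hlen; simp at hlen; omega
  | cons c run ih =>
    intro b rest hnw hb hlen
    rw [List.cons_append, gAux, if_neg (by simp [hnw c (by simp)])]
    by_cases h1 : b ≤ 1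
    · have : b = 1 := by omega
      subst this
      rw [if_pos (by omega)]
      simp
    · rw [if_neg h1, ih (b - 1) rest (fun d hd => hnw d (by simp [hd])) (by omega)
        (by simp at hlen; omega)]
      have ht : (c :: run).take b = c :: run.take (b - 1) := by
        cases b with
        | zero => omega
        | succ n => simp
      have hd : (c :: run).drop b = run.drop (b - 1) := by
        cases b with
        | zero => omega
        | succ n => simp
      rw [ht, hd]; rfl

theorem emitBlocks_gAux (L : Nat) (hL : 1 ≤ L) :
    ∀ (n : Nat) (run rest : List Char), run.length ≤ n →
      (∀ c ∈ run, PySem.Chars.isspace c = false) →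
      (rest = [] ∨ ∃ c cs, rest = c :: cs ∧ PySem.Chars.isspace c = true) →
      emitBlocks L run ++ gAux L L rest = gAux L L (run ++ rest) := by
  intro n
  induction n with
  | zero =>
    intro run rest hn _ _
    have : run = [] := by cases run <;> simp_all
    subst this; rw [emitBlocks]; simp; omega
  | succ n ih =>
    intro run rest hn hnw hrest
    rw [emitBlocks]
    by_cases h : 0 < L ∧ L ≤ run.length
    · rw [dif_pos h, gAux_block L run L rest hnw hL h.2,
        ← ih (run.drop L) rest (by simp [List.length_drop]; omega)
          (fun d hd => hnw d (List.mem_of_mem_drop hd)) hrest]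
      simp
    · rw [dif_neg h]
      have hlt : run.length < L := by omega
      rw [gAux_small L run L rest hnw hlt, gAux_reset L (L - run.length) rest hrest]

theorem runLoop_eq_gAux (L : Nat) (hL : 1 ≤ L) :
    ∀ (n : Nat) (cs : List Char), cs.length ≤ n → runLoop L cs = gAux L L cs := by
  intro n
  induction n with
  | zero =>
    intro cs hn
    have : cs = [] := by cases cs <;> simp_all
    subst this; simp [runLoop, gAux]
  | succ n ih =>
    intro cs hn
    match cs with
    | [] => simp [runLoop, gAux]
    | c :: rest =>
      rw [runLoop]
      by_cases hws : PySem.Chars.isspace c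
      · rw [if_pos hws]
        have hsplit := List.takeWhile_append_dropWhile (p := PySem.Chars.isspace) (l := c :: rest)
        conv_rhs => rw [← hsplit]
        rw [gAux_ws L _ _ (fun d hd => List.mem_takeWhile_imp hd)]
        congr 1
        apply ih
        rw [List.dropWhile_cons, if_pos hws]
        have := List.length_dropWhile_le (p := PySem.Chars.isspace) (l := rest)
        simp at hn ⊢; omega
      · rw [if_neg hws]
        have hsplit := List.takeWhile_append_dropWhile
          (p := fun d => !PySem.Chars.isspace d) (l := c :: rest)
        conv_rhs => rw [← hsplit]
        have hdw : ((c :: rest).dropWhile (fun d => !PySem.Chars.isspace d)) = [] ∨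
            ∃ d ds, ((c :: rest).dropWhile (fun d => !PySem.Chars.isspace d)) = d :: ds ∧
              PySem.Chars.isspace d = true := by
          cases hcase : (c :: rest).dropWhile (fun d => !PySem.Chars.isspace d) with
          | nil => exact Or.inl rfl
          | cons d ds =>
            refine Or.inr ⟨d, ds, rfl, ?_⟩
            have h3 := List.head_dropWhile_not (p := fun d => !PySem.Chars.isspace d)
              (l := c :: rest) (by simp [hcase])
            simp only [hcase, List.head_cons] at h3
            simpa using h3
        rw [← emitBlocks_gAux L hL ((c :: rest).takeWhile (fun d => !PySem.Chars.isspace d)).length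
          _ _ (le_refl _) (fun d hd => by simpa using List.mem_takeWhile_imp hd) hdw]
        congr 1
        apply ih
        rw [List.dropWhile_cons, if_pos (by simp [hws])]
        have := List.length_dropWhile_le (p := fun d => !PySem.Chars.isspace d) (l := rest)
        simp at hn ⊢; omega

-- ===== VERDICT (by name: the statement is the Claim_ definition above) =====
theorem soft_break_py_spec : Claim_equal_soft_break_py := by
  intro text limit _
  unfold Spec_soft_break_py soft_break_py soft_break_py_alt
  have hL : (1 : Nat) ≤ (if 1 < limit then limit.toNat else 1) := by split <;> omega
  rw [aLoop_eq_gAux limit _ rfl text.toList [] [] (by simpa using hL)]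
  simp only [List.nil_append, List.length_nil, Nat.sub_zero]
  rw [runLoop_eq_gAux _ hL text.toList.length text.toList (le_refl _)]
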